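-- pv_equiv track=rewrite | github.com/vit-project/vit | vit/config_parser.py | parse_sort_column
-- ===== SOURCE A (Python) =====
-- SORT_ORDER_CHARACTERS = ['+', '-']
--
-- SORT_COLLATE_CHARACTERS = ['/']
--
-- def parse_sort_column(column_string):
--     order = collate = None
--     parts = list(column_string)
--     while True:
--         if len(parts):
--             letter = parts.pop()
--             if letter in SORT_ORDER_CHARACTERS:
--                 order = letter == '+' and 'ascending' or 'descending'
--             elif letter in SORT_COLLATE_CHARACTERS:
--                 collate = True
--             else:
--                 parts.append(letter)
--                 break
--         else:
--             break
--     column = ''.join(parts)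
--     return (column, order, collate)
-- ===== SOURCE B (Python) =====
-- def parse_sort_column(column_string):
--     column = column_string.rstrip('+-/')
--     suffix = column_string[len(column):]
--     order = None
--     for ch in suffix:
--         if ch in '+-':
--             order = 'ascending' if ch == '+' else 'descending'
--             break
--     collate = True if '/' in suffix else None
--     return (column, order, collate)
-- ===== Notes on version B (the rewrite author's own statement) =====
-- stated objective: simpler
-- what changed: Replaces the right-to-left pop loop with a single rstrip of the marker characters to get the column, then classifies the stripped suffix separately: the leftmost order marker gives the order, any collate marker gives collate.
import Mathlib
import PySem

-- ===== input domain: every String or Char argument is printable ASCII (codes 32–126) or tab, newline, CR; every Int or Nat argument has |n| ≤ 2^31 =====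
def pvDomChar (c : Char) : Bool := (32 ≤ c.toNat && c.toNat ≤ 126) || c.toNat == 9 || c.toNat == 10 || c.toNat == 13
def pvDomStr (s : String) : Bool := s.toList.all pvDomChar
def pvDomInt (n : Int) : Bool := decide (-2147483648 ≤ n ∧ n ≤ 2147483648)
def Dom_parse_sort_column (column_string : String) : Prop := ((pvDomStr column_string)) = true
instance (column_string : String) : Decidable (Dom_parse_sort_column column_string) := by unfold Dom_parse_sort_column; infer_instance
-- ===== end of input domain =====

-- B replaces A's right-to-left pop loop with rstrip('+-/') plus separate classification
-- of the stripped suffix (first '+'/'-' → order, any '/' → collate): simpler decomposition.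


-- ===== PORT A =====
-- the while-pop loop of A: pop from the end, update order/collate, re-append and stop
-- at the first non-marker character
def pvA_loop (parts : List Char) (order : Option String) (collate : Option Bool) :
    List Char × Option String × Option Bool :=
  match h : parts.getLast? with
  | none => (parts, order, collate)
  | some letter =>
    if letter = '+' ∨ letter = '-' then
      pvA_loop parts.dropLast (some (if letter = '+' then "ascending" else "descending")) collate
    else if letter = '/' then
      pvA_loop parts.dropLast order (some true)
    else
      (parts, order, collate)
termination_by parts.length
decreasing_by
  all_goals
    have hne : parts ≠ [] := by
      intro hnil; rw [hnil] at h; simp at h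
    simpa [List.length_dropLast] using Nat.sub_lt (List.length_pos_of_ne_nil hne) Nat.one_pos

def parse_sort_column (column_string : String) : String × Option String × Option Bool :=
  let r := pvA_loop column_string.toList none none
  (String.ofList r.1, r.2.1, r.2.2)

-- ===== PORT B =====
-- hand port of str.rstrip('+-/') (PySem has no chars-argument rstrip): exact — drops
-- the maximal trailing run of '+', '-', '/' characters
def pvRstripMarks (cs : List Char) : List Char :=
  (cs.reverse.dropWhile (fun c => c = '+' || c = '-' || c = '/')).reverse

-- B's for-loop with break: first '+' or '-' decides the order
def pvOrderOf : List Char → Option String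
  | [] => none
  | c :: rest =>
    if c = '+' || c = '-' then some (if c = '+' then "ascending" else "descending")
    else pvOrderOf rest

def parse_sort_column_alt (column_string : String) : String × Option String × Option Bool :=
  let column := pvRstripMarks column_string.toList
  let suffix := column_string.toList.drop column.length
  let order := pvOrderOf suffix
  let collate : Option Bool := if '/' ∈ suffix then some true else none
  (String.ofList column, order, collate)

-- ===== PRECONDITION & SPEC =====
def Spec_parse_sort_column (column_string : String) (out : String × Option String × Option Bool) : Prop := out = parse_sort_column_alt column_string
instance (column_string : String) (out : String × Option String × Option Bool) : Decidable (Spec_parse_sort_column column_string out) := by unfold Spec_parse_sort_column; infer_instance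

-- ===== CLAIM (what is proved, stated in full; the proofs are below) =====
def Claim_equal_parse_sort_column : Prop := ∀ (column_string : String), Dom_parse_sort_column column_string → Spec_parse_sort_column column_string (parse_sort_column column_string)

-- ===== LEMMAS AND PROOFS =====

lemma pvOrderOf_append (a b : List Char) :
    pvOrderOf (a ++ b) = (pvOrderOf a).or (pvOrderOf b) := by
  induction a with
  | nil => simp [pvOrderOf]
  | cons c rest ih =>
    by_cases h : (c = '+' || c = '-') = true <;> simp [pvOrderOf, h, ih]

-- A's loop on column ++ suffix, where every suffix char is a marker and column does not
-- end with one, computes exactly B's decomposition.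
lemma pvA_loop_eq (column suffix : List Char)
    (hsuf : ∀ c ∈ suffix, c = '+' ∨ c = '-' ∨ c = '/')
    (hcol : ∀ c, column.getLast? = some c → ¬ (c = '+' ∨ c = '-' ∨ c = '/'))
    (ord : Option String) (col : Option Bool) :
    pvA_loop (column ++ suffix) ord col =
      (column, (pvOrderOf suffix).or ord,
        if '/' ∈ suffix then some true else col) := by
  induction suffix using List.reverseRecOn generalizing ord col with
  | nil =>
    rw [List.append_nil]
    rw [pvA_loop]
    cases h : column.getLast? with
    | none => simp [pvOrderOf]
    | some c =>
      have hc := hcol c h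
      have h1 : ¬ c = '+' := fun e => hc (Or.inl e)
      have h2 : ¬ c = '-' := fun e => hc (Or.inr (Or.inl e))
      have h3 : ¬ c = '/' := fun e => hc (Or.inr (Or.inr e))
      simp [h1, h2, h3, pvOrderOf]
  | append_singleton suf c ih =>
    have hc : c = '+' ∨ c = '-' ∨ c = '/' := by
      apply hsuf; simp
    have hsuf' : ∀ x ∈ suf, x = '+' ∨ x = '-' ∨ x = '/' := by
      intro x hx; apply hsuf; simp [hx]
    have hlast : (column ++ (suf ++ [c])).getLast? = some c := by
      simp
    have hdrop : (column ++ (suf ++ [c])).dropLast = column ++ suf := by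
      rw [← List.append_assoc]
      simp
    rw [← List.append_assoc]
    rw [pvA_loop]
    rw [← List.append_assoc] at hlast hdrop
    rw [hlast]
    simp only []
    rcases hc with hc | hc | hc
    · subst hc
      rw [hdrop, ih hsuf']
      simp [pvOrderOf_append, pvOrderOf]
    · subst hc
      rw [hdrop, ih hsuf']
      simp [pvOrderOf_append, pvOrderOf]
    · subst hc
      have h1 : ¬ (('/' : Char) = '+' ∨ ('/' : Char) = '-') := by decide
      rw [if_neg h1, if_pos rfl, hdrop, ih hsuf']
      simp [pvOrderOf_append, pvOrderOf]

lemma pvSuffix_eq (cs : List Char) :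
    cs.drop (pvRstripMarks cs).length =
      (cs.reverse.takeWhile (fun c => c = '+' || c = '-' || c = '/')).reverse := by
  unfold pvRstripMarks
  conv_lhs => rw [← List.reverse_reverse cs, ← List.takeWhile_append_dropWhile
    (p := fun c => c = '+' || c = '-' || c = '/') (l := cs.reverse)]
  rw [List.reverse_append, List.drop_left']
  simp

lemma pvDecomp (cs : List Char) :
    cs = pvRstripMarks cs ++ cs.drop (pvRstripMarks cs).length := by
  rw [pvSuffix_eq]
  unfold pvRstripMarks
  rw [← List.reverse_append, List.takeWhile_append_dropWhile, List.reverse_reverse]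

theorem parse_sort_column_spec : Claim_equal_parse_sort_column := by
  intro s _
  unfold Spec_parse_sort_column parse_sort_column parse_sort_column_alt
  set cs := s.toList with hcs
  set column := pvRstripMarks cs with hcolumn
  set suffix := cs.drop column.length with hsuffix
  have hdec : cs = column ++ suffix := pvDecomp cs
  have hsufeq : suffix =
      (cs.reverse.takeWhile (fun c => c = '+' || c = '-' || c = '/')).reverse := by
    rw [hsuffix, hcolumn]; exact pvSuffix_eq cs
  have hsuf : ∀ c ∈ suffix, c = '+' ∨ c = '-' ∨ c = '/' := by
    intro c hc
    rw [hsufeq, List.mem_reverse] at hc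
    have := List.mem_takeWhile_imp hc
    simp at this
    tauto
  have hcol : ∀ c, column.getLast? = some c → ¬ (c = '+' ∨ c = '-' ∨ c = '/') := by
    intro c hc
    rw [hcolumn] at hc
    unfold pvRstripMarks at hc
    rw [List.getLast?_reverse] at hc
    have := List.head?_dropWhile_not (p := fun c => c = '+' || c = '-' || c = '/') cs.reverse
    rw [hc] at this
    simp at this
    tauto
  rw [hdec]
  rw [pvA_loop_eq column suffix hsuf hcol none none]
  simp
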